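-- pv_equiv track=rewrite | github.com/Graylab/AF2Dock | AF2Dock/utils/utils.py | fix_resi_auth
-- ===== SOURCE A (Python) =====
-- def fix_resi_auth(resi_auth_split):
--     #e.g. 4v88 chain BO
--     resi_auth_split_fixed = []
--     first_num = True
--     last_int = 0
--     for idx in range(len(resi_auth_split)):
--         res_i = resi_auth_split[idx]
--         if res_i == '':
--             resi_auth_split_fixed.append(res_i)
--         else:
--             if first_num:
--                 resi_auth_split_fixed.append(res_i)
--                 first_num = False
--                 last_int = int(res_i)
--             else:
--                 if int(res_i) > last_int:
--                     resi_auth_split_fixed.append(res_i)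
--                     last_int = int(res_i)
--     return resi_auth_split_fixed
-- ===== SOURCE B (Python) =====
-- def fix_resi_auth(resi_auth_split):
--     # Two-pass: precompute a keep-flag per non-empty token (strict prefix-maximum),
--     # then rebuild the list, re-inserting '' tokens positionally.
--     vals = [int(t) for t in resi_auth_split if t != '']
--     flags = []
--     m = None
--     for v in vals:
--         flags.append(m is None or v > m)
--         m = v if m is None else max(m, v)
--     out = []
--     k = 0
--     for t in resi_auth_split:
--         if t == '':
--             out.append(t)
--         else:
--             if flags[k]:
--                 out.append(t)
--             k += 1
--     return out
-- ===== Notes on version B (the rewrite author's own statement) =====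
-- stated objective: alternative
-- what changed: Replaces A's inline first_num/last_int state machine with a precompute-then-filter decomposition: parse the non-empty tokens, compute a strict-prefix-maximum keep-flag per token in one pass, then rebuild the list consuming one flag per non-empty token and re-inserting '' verbatim.
import Mathlib
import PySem

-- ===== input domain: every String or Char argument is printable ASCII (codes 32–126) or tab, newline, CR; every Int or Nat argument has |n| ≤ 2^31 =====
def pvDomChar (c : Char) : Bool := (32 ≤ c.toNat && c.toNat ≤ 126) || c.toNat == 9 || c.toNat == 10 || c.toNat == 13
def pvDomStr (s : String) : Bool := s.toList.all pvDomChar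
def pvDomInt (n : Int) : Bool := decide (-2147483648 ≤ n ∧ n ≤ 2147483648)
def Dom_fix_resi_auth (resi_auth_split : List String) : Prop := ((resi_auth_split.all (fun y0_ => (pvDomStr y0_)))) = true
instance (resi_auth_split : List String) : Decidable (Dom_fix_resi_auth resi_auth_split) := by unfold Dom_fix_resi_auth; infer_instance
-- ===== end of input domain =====

-- ===== PORT A =====
-- B replaces A's inline first_num/last_int state machine by a two-pass precompute-flags-then-filter decomposition (alternative, same cost).
-- int(s) on the admitted domain (Pre_ guarantees it parses); exact via PySem.Int.ofStr?
def pvInt (s : String) : Int := (PySem.Int.ofStr? s).getD 0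

def fix_resi_auth (resi_auth_split : List String) : List String :=
  (resi_auth_split.foldl
    (fun (st : List String × Bool × Int) res_i =>
      if res_i = "" then (st.1 ++ [res_i], st.2.1, st.2.2)
      else if st.2.1 then (st.1 ++ [res_i], false, pvInt res_i)
      else if pvInt res_i > st.2.2 then (st.1 ++ [res_i], false, pvInt res_i)
      else st)
    ([], true, 0)).1

-- ===== PORT B =====
-- keep-flags: one flag per value; first is kept, later ones iff they strictly exceed the running max m
def pvFlags : List Int → Option Int → List Bool
  | [], _ => []
  | v :: vs, none => true :: pvFlags vs (some v)
  | v :: vs, some m => decide (v > m) :: pvFlags vs (some (max m v))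

-- rebuild: '' verbatim, otherwise consume one flag and keep the token iff the flag is true
def pvMerge : List String → List Bool → List String
  | [], _ => []
  | t :: ts, fs =>
    if t = "" then t :: pvMerge ts fs
    else match fs with
      | [] => pvMerge ts []          -- unreachable: one flag exists per non-empty token
      | f :: fs' => if f then t :: pvMerge ts fs' else pvMerge ts fs'

def fix_resi_auth_alt (resi_auth_split : List String) : List String :=
  let vals := (resi_auth_split.filter (fun t => t ≠ "")).map pvInt
  pvMerge resi_auth_split (pvFlags vals none)

-- ===== PRECONDITION & SPEC =====
-- Pre_ excludes exactly the inputs where Python A raises ValueError: a non-empty token int() cannot parse.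
def Pre_fix_resi_auth (resi_auth_split : List String) : Prop :=
  ∀ s ∈ resi_auth_split, s ≠ "" → (PySem.Int.ofStr? s).isSome

instance (resi_auth_split : List String) : Decidable (Pre_fix_resi_auth resi_auth_split) := by
  unfold Pre_fix_resi_auth; infer_instance

def pvWitness_fix_resi_auth : List String := ["3", "", "1", "7", " 7 ", "+8"]

def Spec_fix_resi_auth (resi_auth_split : List String) (out : List String) : Prop := out = fix_resi_auth_alt resi_auth_split
instance (resi_auth_split : List String) (out : List String) : Decidable (Spec_fix_resi_auth resi_auth_split out) := by unfold Spec_fix_resi_auth; infer_instance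

-- ===== CLAIM (what is proved, stated in full; the proofs are below) =====
def Claim_equal_fix_resi_auth : Prop := ∀ (resi_auth_split : List String), Dom_fix_resi_auth resi_auth_split → Pre_fix_resi_auth resi_auth_split → Spec_fix_resi_auth resi_auth_split (fix_resi_auth resi_auth_split)

-- ===== LEMMAS AND PROOFS =====

-- loop invariant: A's fold from state (acc, first, last) produces acc ++ B's merge with the
-- corresponding option state (none iff first; otherwise some last)
theorem fix_resi_auth_loop (l : List String) (acc : List String) (first : Bool) (last : Int) :
    (l.foldl
      (fun (st : List String × Bool × Int) res_i =>
        if res_i = "" then (st.1 ++ [res_i], st.2.1, st.2.2)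
        else if st.2.1 then (st.1 ++ [res_i], false, pvInt res_i)
        else if pvInt res_i > st.2.2 then (st.1 ++ [res_i], false, pvInt res_i)
        else st)
      (acc, first, last)).1
    = acc ++ pvMerge l (pvFlags ((l.filter (fun t => t ≠ "")).map pvInt)
        (if first then none else some last)) := by
  induction l generalizing acc first last with
  | nil => simp [pvMerge]
  | cons t ts ih =>
    by_cases ht : t = ""
    · subst ht
      simp [List.foldl, pvMerge, ih, List.filter]
    · cases first with
      | true =>
        simp [List.foldl, ht, ih, pvFlags, pvMerge, List.filter_cons, List.map]
      | false =>
        by_cases hgt : pvInt t > last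
        · have hmax : max last (pvInt t) = pvInt t := by omega
          simp [List.foldl, ht, hgt, ih, pvFlags, pvMerge, hmax]
        · have hmax : max last (pvInt t) = last := by omega
          simp [List.foldl, ht, hgt, ih, pvFlags, pvMerge, hmax]

-- ===== VERDICT (by name: the statement is the Claim_ definition above) =====
theorem fix_resi_auth_spec : Claim_equal_fix_resi_auth := by
  intro l _ _
  unfold Spec_fix_resi_auth fix_resi_auth fix_resi_auth_alt
  simpa using fix_resi_auth_loop l [] true 0
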